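-- pv_equiv track=rewrite | github.com/hanialabadi/options | scan_engine/mc_position_sizing.py | _vince_strategy_family
-- ===== SOURCE A (Python) =====
-- def _vince_strategy_family(strategy_name: str) -> set:
--     """Return the family group a strategy belongs to for cross-strategy P&L pooling."""
--     s = strategy_name.upper()
--     income_family = {"COVERED_CALL", "CC", "BUY_WRITE", "CASH_SECURED_PUT", "CSP",
--                      "PUT_CREDIT_SPREAD", "BULL_PUT_SPREAD", "CALL_CREDIT_SPREAD",
--                      "BEAR_CALL_SPREAD", "IRON_CONDOR", "IRON_BUTTERFLY"}
--     long_call_family = {"LONG_CALL", "LEAP", "ULTRA_LEAP", "LONG_CALL_DIAGONAL"}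
--     long_put_family = {"LONG_PUT", "LONG_PUT_DIAGONAL"}
--     vol_family = {"STRADDLE", "STRANGLE", "LONG_STRADDLE", "LONG_STRANGLE"}
--     for fam in (income_family, long_call_family, long_put_family, vol_family):
--         if s in fam:
--             return fam
--     return {strategy_name}
-- ===== SOURCE B (Python) =====
-- def _vince_strategy_family(strategy_name: str) -> set:
--     """Return the family group a strategy belongs to for cross-strategy P&L pooling."""
--     s = strategy_name.upper()
--     tagged = [
--         ("COVERED_CALL", "I"), ("CC", "I"), ("BUY_WRITE", "I"),
--         ("CASH_SECURED_PUT", "I"), ("CSP", "I"), ("PUT_CREDIT_SPREAD", "I"),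
--         ("BULL_PUT_SPREAD", "I"), ("CALL_CREDIT_SPREAD", "I"),
--         ("BEAR_CALL_SPREAD", "I"), ("IRON_CONDOR", "I"), ("IRON_BUTTERFLY", "I"),
--         ("LONG_CALL", "C"), ("LEAP", "C"), ("ULTRA_LEAP", "C"),
--         ("LONG_CALL_DIAGONAL", "C"),
--         ("LONG_PUT", "P"), ("LONG_PUT_DIAGONAL", "P"),
--         ("STRADDLE", "V"), ("STRANGLE", "V"),
--         ("LONG_STRADDLE", "V"), ("LONG_STRANGLE", "V"),
--     ]
--     for name, tag in tagged:
--         if name == s: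
--             # reconstruct the family as the set of all names sharing this tag
--             return {n for n, t in tagged if t == tag}
--     return {strategy_name}
-- ===== Notes on version B (the rewrite author's own statement) =====
-- stated objective: alternative
-- what changed: Replaces the four family sets and the set-membership loop by a single flat (name, tag) association list: a linear scan finds the matching name's tag and the family is reconstructed by filtering the flat list for that tag, instead of returning one of four prebuilt sets.
import Mathlib
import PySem

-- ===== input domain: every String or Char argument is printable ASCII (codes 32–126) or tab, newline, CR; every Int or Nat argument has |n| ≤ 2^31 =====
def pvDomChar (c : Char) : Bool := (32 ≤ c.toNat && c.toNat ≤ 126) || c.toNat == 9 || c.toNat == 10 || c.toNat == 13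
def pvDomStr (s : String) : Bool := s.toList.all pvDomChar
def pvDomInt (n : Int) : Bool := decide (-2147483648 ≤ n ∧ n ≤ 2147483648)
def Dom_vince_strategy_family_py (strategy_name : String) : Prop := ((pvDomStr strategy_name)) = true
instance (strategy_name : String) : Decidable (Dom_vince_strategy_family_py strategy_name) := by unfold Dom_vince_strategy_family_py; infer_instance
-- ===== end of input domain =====

-- B replaces the four per-family sets and the scanning loop by one flat (name, tag) association list: a linear scan finds the tag, and the family is rebuilt by filtering the flat list (alternative decomposition; same observable result).


-- ===== PORT A =====
def vince_strategy_family_py (strategy_name : String) : List String :=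
  let s := PySem.Str.upper strategy_name
  let income_family : PySem.Set String := PySem.Set.ofList
    ["COVERED_CALL", "CC", "BUY_WRITE", "CASH_SECURED_PUT", "CSP",
     "PUT_CREDIT_SPREAD", "BULL_PUT_SPREAD", "CALL_CREDIT_SPREAD",
     "BEAR_CALL_SPREAD", "IRON_CONDOR", "IRON_BUTTERFLY"]
  let long_call_family : PySem.Set String := PySem.Set.ofList
    ["LONG_CALL", "LEAP", "ULTRA_LEAP", "LONG_CALL_DIAGONAL"]
  let long_put_family : PySem.Set String := PySem.Set.ofList
    ["LONG_PUT", "LONG_PUT_DIAGONAL"]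
  let vol_family : PySem.Set String := PySem.Set.ofList
    ["STRADDLE", "STRANGLE", "LONG_STRADDLE", "LONG_STRANGLE"]
  -- 'for fam in (…): if s in fam: return fam' = first family containing s
  match [income_family, long_call_family, long_put_family, vol_family].find?
          (fun fam => PySem.Set.contains fam s) with
  | some fam => fam
  | none => PySem.Set.ofList [strategy_name]

-- ===== PORT B =====
def vince_strategy_family_py_alt (strategy_name : String) : List String :=
  let s := PySem.Str.upper strategy_name
  let tagged : List (String × String) :=
    [("COVERED_CALL", "I"), ("CC", "I"), ("BUY_WRITE", "I"),
     ("CASH_SECURED_PUT", "I"), ("CSP", "I"), ("PUT_CREDIT_SPREAD", "I"),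
     ("BULL_PUT_SPREAD", "I"), ("CALL_CREDIT_SPREAD", "I"),
     ("BEAR_CALL_SPREAD", "I"), ("IRON_CONDOR", "I"), ("IRON_BUTTERFLY", "I"),
     ("LONG_CALL", "C"), ("LEAP", "C"), ("ULTRA_LEAP", "C"),
     ("LONG_CALL_DIAGONAL", "C"),
     ("LONG_PUT", "P"), ("LONG_PUT_DIAGONAL", "P"),
     ("STRADDLE", "V"), ("STRANGLE", "V"),
     ("LONG_STRADDLE", "V"), ("LONG_STRANGLE", "V")]
  -- 'for name, tag in tagged: if name == s: return {n for n, t in tagged if t == tag}'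
  match tagged.find? (fun p => p.1 == s) with
  | some p => PySem.Set.ofList ((tagged.filter (fun q => q.2 == p.2)).map Prod.fst)
  | none => PySem.Set.ofList [strategy_name]

-- ===== PRECONDITION & SPEC =====
def Spec_vince_strategy_family_py (strategy_name : String) (out : List String) : Prop := out = vince_strategy_family_py_alt strategy_name
instance (strategy_name : String) (out : List String) : Decidable (Spec_vince_strategy_family_py strategy_name out) := by unfold Spec_vince_strategy_family_py; infer_instance

-- ===== CLAIM (what is proved, stated in full; the proofs are below) =====
def Claim_equal_vince_strategy_family_py : Prop := ∀ (strategy_name : String), Dom_vince_strategy_family_py strategy_name → Spec_vince_strategy_family_py strategy_name (vince_strategy_family_py strategy_name)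

-- ===== LEMMAS AND PROOFS =====

-- ===== VERDICT (by name: the statement is the Claim_ definition above) =====
theorem vince_strategy_family_py_spec : Claim_equal_vince_strategy_family_py := by
  intro sn _
  show vince_strategy_family_py sn = vince_strategy_family_py_alt sn
  simp only [vince_strategy_family_py, vince_strategy_family_py_alt]
  generalize PySem.Str.upper sn = t
  by_cases h1 : t = "COVERED_CALL"
  · subst h1; rfl
  by_cases h2 : t = "CC"
  · subst h2; rfl
  by_cases h3 : t = "BUY_WRITE"
  · subst h3; rfl
  by_cases h4 : t = "CASH_SECURED_PUT"
  · subst h4; rfl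
  by_cases h5 : t = "CSP"
  · subst h5; rfl
  by_cases h6 : t = "PUT_CREDIT_SPREAD"
  · subst h6; rfl
  by_cases h7 : t = "BULL_PUT_SPREAD"
  · subst h7; rfl
  by_cases h8 : t = "CALL_CREDIT_SPREAD"
  · subst h8; rfl
  by_cases h9 : t = "BEAR_CALL_SPREAD"
  · subst h9; rfl
  by_cases h10 : t = "IRON_CONDOR"
  · subst h10; rfl
  by_cases h11 : t = "IRON_BUTTERFLY"
  · subst h11; rfl
  by_cases h12 : t = "LONG_CALL"
  · subst h12; rfl
  by_cases h13 : t = "LEAP"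
  · subst h13; rfl
  by_cases h14 : t = "ULTRA_LEAP"
  · subst h14; rfl
  by_cases h15 : t = "LONG_CALL_DIAGONAL"
  · subst h15; rfl
  by_cases h16 : t = "LONG_PUT"
  · subst h16; rfl
  by_cases h17 : t = "LONG_PUT_DIAGONAL"
  · subst h17; rfl
  by_cases h18 : t = "STRADDLE"
  · subst h18; rfl
  by_cases h19 : t = "STRANGLE"
  · subst h19; rfl
  by_cases h20 : t = "LONG_STRADDLE"
  · subst h20; rfl
  by_cases h21 : t = "LONG_STRANGLE"
  · subst h21; rfl
  simp [PySem.Set.contains, PySem.Set.ofList, PySem.Set.add, List.find?, h1, h2, h3, h4, h5, h6, h7, h8, h9, h10, h11, h12, h13, h14, h15, h16, h17, h18, h19, h20, h21, show ("COVERED_CALL" == t) = false by simp [Ne.symm h1], show ("CC" == t) = false by simp [Ne.symm h2], show ("BUY_WRITE" == t) = false by simp [Ne.symm h3], show ("CASH_SECURED_PUT" == t) = false by simp [Ne.symm h4], show ("CSP" == t) = false by simp [Ne.symm h5], show ("PUT_CREDIT_SPREAD" == t) = false by simp [Ne.symm h6], show ("BULL_PUT_SPREAD" == t) = false by simp [Ne.symm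 h7], show ("CALL_CREDIT_SPREAD" == t) = false by simp [Ne.symm h8], show ("BEAR_CALL_SPREAD" == t) = false by simp [Ne.symm h9], show ("IRON_CONDOR" == t) = false by simp [Ne.symm h10], show ("IRON_BUTTERFLY" == t) = false by simp [Ne.symm h11], show ("LONG_CALL" == t) = false by simp [Ne.symm h12], show ("LEAP" == t) = false by simp [Ne.symm h13], show ("ULTRA_LEAP" == t) = false by simp [Ne.symm h14], show ("LONG_CALL_DIAGONAL" == t) = false by simp [Ne.symm h15], show ("LONG_PUT" == t) = false by simp [Ne.symm h16], show ("LONG_PUT_DIAGONAL" == t) = false by simp [Ne.symm h17], show ("STRADDLE" == t) = false by simp [Ne.symm h18], show ("STRANGLE" == t) = false by simp [Ne.symm h19], show ("LONG_STRADDLE" == t) = false by simp [Ne.symm h20], show ("LONG_STRANGLE" == t) = false by simp [Ne.symm h21]]
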